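-- pv_equiv track=rewrite | github.com/vokaflow/Mela_Vokaflow | src/backend/routers/voice.py | generate_training_texts
-- ===== SOURCE A (Python) =====
-- from typing import Optional, Dict, Any, List, Union
--
-- def generate_training_texts(language: str, count: int = 50) -> List[str]:
--     """Genera textos de entrenamiento para una voz"""
--     training_texts = {
--         "es": [
--             "El reconocimiento de voz es una tecnología fascinante.",
--             "Buenos días, espero que tengas un excelente día.",
--             "La inteligencia artificial está transformando el mundo.",
--             "Por favor, habla claramente y con naturalidad.",
--             "Este es un ejemplo de texto para entrenar voces.",
--         ],
--         "en": [
--             "Voice recognition is a fascinating technology.",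
--             "Good morning, I hope you have an excellent day.",
--             "Artificial intelligence is transforming the world.",
--             "Please speak clearly and naturally.",
--             "This is an example text for training voices.",
--         ]
--     }
--
--     base_texts = training_texts.get(language, training_texts["es"])
--
--     # Expandir la lista repitiendo y variando
--     expanded_texts = []
--     for i in range(count):
--         text = base_texts[i % len(base_texts)]
--         if i >= len(base_texts):
--             text = f"Variación {i}: {text}"
--         expanded_texts.append(text)
--
--     return expanded_texts
-- ===== SOURCE B (Python) =====
-- def generate_training_texts(language: str, count: int = 50) -> list:
--     training_texts = {
--         "es": [
--             "El reconocimiento de voz es una tecnología fascinante.",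
--             "Buenos días, espero que tengas un excelente día.",
--             "La inteligencia artificial está transformando el mundo.",
--             "Por favor, habla claramente y con naturalidad.",
--             "Este es un ejemplo de texto para entrenar voces.",
--         ],
--         "en": [
--             "Voice recognition is a fascinating technology.",
--             "Good morning, I hope you have an excellent day.",
--             "Artificial intelligence is transforming the world.",
--             "Please speak clearly and naturally.",
--             "This is an example text for training voices.",
--         ]
--     }
--     base_texts = training_texts.get(language, training_texts["es"])
--     n = len(base_texts)
--     # Generate whole cycles of the base list at a time: the first cycle verbatim,
--     # every later cycle fully labelled, and truncate the last cycle to fit.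
--     out = []
--     start = 0
--     while start < count:
--         if start == 0:
--             block = base_texts
--         else:
--             block = [f"Variación {start + j}: {t}" for j, t in enumerate(base_texts)]
--         out.extend(block[:count - start])
--         start += n
--     return out
-- ===== Notes on version B (the rewrite author's own statement) =====
-- stated objective: alternative
-- what changed: Instead of A's single index loop over range(count) with a per-element modulo lookup and an i>=len branch, B iterates cycle-by-cycle: it emits whole copies of the base list (the first verbatim, later ones labelled via enumerate with an offset) and truncates the final block, never computing i % n per element.
import Mathlib
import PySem

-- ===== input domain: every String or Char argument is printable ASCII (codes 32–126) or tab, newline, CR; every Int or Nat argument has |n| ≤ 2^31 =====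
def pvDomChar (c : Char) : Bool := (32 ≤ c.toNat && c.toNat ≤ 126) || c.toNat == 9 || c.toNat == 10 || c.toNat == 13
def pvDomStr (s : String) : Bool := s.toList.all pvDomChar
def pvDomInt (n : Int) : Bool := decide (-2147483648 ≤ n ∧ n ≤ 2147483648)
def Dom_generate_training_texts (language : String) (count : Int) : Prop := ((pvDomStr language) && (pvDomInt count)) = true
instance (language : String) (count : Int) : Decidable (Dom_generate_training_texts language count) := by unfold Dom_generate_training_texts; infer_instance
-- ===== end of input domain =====

-- B replaces A's per-index loop (modulo lookup + i>=len branch each iteration) by a cycle-at-a-time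
-- loop emitting whole (possibly labelled) copies of the base list and truncating the last one.

-- The two base-text tables (string literals shared by both ports).
def pvTextsEs : List String :=
  ["El reconocimiento de voz es una tecnología fascinante.",
   "Buenos días, espero que tengas un excelente día.",
   "La inteligencia artificial está transformando el mundo.",
   "Por favor, habla claramente y con naturalidad.",
   "Este es un ejemplo de texto para entrenar voces."]
def pvTextsEn : List String :=
  ["Voice recognition is a fascinating technology.",
   "Good morning, I hope you have an excellent day.",
   "Artificial intelligence is transforming the world.",
   "Please speak clearly and naturally.",
   "This is an example text for training voices."]

-- ===== PORT A =====
-- `base_texts[i % len(base_texts)]` never raises (0 ≤ i % 5 < 5), so pyGetD with default "" is exact here.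
def generate_training_texts (language : String) (count : Int) : List String :=
  let training_texts : PySem.Dict String (List String) :=
    PySem.Dict.ofList [("es", pvTextsEs), ("en", pvTextsEn)]
  let base_texts := (training_texts.get? language).getD pvTextsEs
  (PySem.List.pyRange 0 count 1).foldl
    (fun expanded_texts i =>
      let text := PySem.List.pyGetD base_texts (PySem.Int.mod i (base_texts.length : Int)) ""
      let text := if (base_texts.length : Int) ≤ i then "Variación " ++ PySem.Int.toStr i ++ ": " ++ text else text
      expanded_texts ++ [text]) []

-- ===== PORT B =====
-- B's `while start < count` loop; the extra `base ≠ []` guard only makes the recursion total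
-- (in Python the loop would never terminate on an empty base list; base is always a 5-element literal).
def pvBlocks (base : List String) (count : Int) (start : Int) : List String :=
  if h : start < count ∧ base ≠ [] then
    let block := if start = 0 then base
      else (PySem.List.enumerate base 0).map
        (fun jt => "Variación " ++ PySem.Int.toStr (start + jt.1) ++ ": " ++ jt.2)
    PySem.List.slice block none (some (count - start)) ++ pvBlocks base count (start + (base.length : Int))
  else []
termination_by (count - start).toNat
decreasing_by
  have hlen : 1 ≤ (base.length : Int) := by
    have := h.2; cases base with
    | nil => simp at this
    | cons a t => simp
  have := h.1
  omega

def generate_training_texts_alt (language : String) (count : Int) : List String :=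
  let training_texts : PySem.Dict String (List String) :=
    PySem.Dict.ofList [("es", pvTextsEs), ("en", pvTextsEn)]
  let base_texts := (training_texts.get? language).getD pvTextsEs
  pvBlocks base_texts count 0

-- ===== PRECONDITION & SPEC =====
def Spec_generate_training_texts (language : String) (count : Int) (out : List String) : Prop := out = generate_training_texts_alt language count
instance (language : String) (count : Int) (out : List String) : Decidable (Spec_generate_training_texts language count out) := by unfold Spec_generate_training_texts; infer_instance

-- ===== CLAIM (what is proved, stated in full; the proofs are below) =====
def Claim_equal_generate_training_texts : Prop := ∀ (language : String) (count : Int), Dom_generate_training_texts language count → Spec_generate_training_texts language count (generate_training_texts language count)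

-- ===== LEMMAS AND PROOFS =====

-- A's loop body as a function of the index (proof-only helper).
def pvG (b : List String) (i : Int) : String :=
  let text := PySem.List.pyGetD b (PySem.Int.mod i (b.length : Int)) ""
  if (b.length : Int) ≤ i then "Variación " ++ PySem.Int.toStr i ++ ": " ++ text else text

-- The dict lookup, resolved: either table, or the Spanish default.
lemma pv_get_dict (l : String) :
    ((PySem.Dict.ofList [("es", pvTextsEs), ("en", pvTextsEn)] : PySem.Dict String (List String)).get? l).getD pvTextsEs
      = if l == "es" then pvTextsEs else if l == "en" then pvTextsEn else pvTextsEs := by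
  have hd : (PySem.Dict.ofList [("es", pvTextsEs), ("en", pvTextsEn)] : PySem.Dict String (List String))
      = PySem.Dict.mk [("es", pvTextsEs), ("en", pvTextsEn)] := by decide
  rw [hd]
  by_cases h1 : l = "es"
  · simp [PySem.Dict.get?, h1]
  · by_cases h2 : l = "en"
    · simp [PySem.Dict.get?, h2]
    · simp [PySem.Dict.get?, h1, h2, Ne.symm h1, Ne.symm h2]

-- B's cycle loop at a multiple of 5 produces exactly A's per-index values over [s, count).
lemma pv_blocks_eq_map (x0 x1 x2 x3 x4 : String) (count s : Int)
    (hs : 0 ≤ s) (hm : s % 5 = 0) :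
    pvBlocks [x0, x1, x2, x3, x4] count s
      = (PySem.List.pyRange s count 1).map (pvG [x0, x1, x2, x3, x4]) := by
  by_cases hlt : s < count
  · rw [pvBlocks, dif_pos ⟨hlt, by simp⟩]
    have hrec := pv_blocks_eq_map x0 x1 x2 x3 x4 count (s + 5) (by omega) (by omega)
    have hblock : (if s = 0 then [x0, x1, x2, x3, x4]
        else (PySem.List.enumerate [x0, x1, x2, x3, x4] 0).map
          (fun jt => "Variación " ++ PySem.Int.toStr (s + jt.1) ++ ": " ++ jt.2))
        = (PySem.List.pyRange s (s + 5) 1).map (pvG [x0, x1, x2, x3, x4]) := by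
      rw [PySem.List.pyRange_one]
      have h5 : (s + 5 - s).toNat = 5 := by omega
      rw [h5, show List.range 5 = [0, 1, 2, 3, 4] from rfl]
      by_cases h0 : s = 0
      · subst h0
        norm_num [pvG, PySem.Int.mod, PySem.List.pyGetD, PySem.List.pyGet?, PySem.List.pyIdx?]
        exact ⟨rfl, rfl, rfl, rfl⟩
      · have hs5 : 5 ≤ s := by omega
        rw [if_neg h0]
        have hg : ∀ (k : Nat) (t : String), k < 5 →
            PySem.List.pyGetD [x0, x1, x2, x3, x4] ((s + (k : Int)) % 5) "" = t →
            pvG [x0, x1, x2, x3, x4] (s + (k : Int)) =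
              "Variación " ++ PySem.Int.toStr (s + (k : Int)) ++ ": " ++ t := by
          intro k t hk ht
          unfold pvG
          rw [show (([x0, x1, x2, x3, x4] : List String).length : Int) = 5 from by norm_num,
              PySem.Int.mod_eq_emod_of_pos (by norm_num), if_pos (by omega), ht]
        simp only [PySem.List.enumerate_cons, PySem.List.enumerate_nil, List.map_cons, List.map_nil]
        have e0 := hg 0 x0 (by omega) (by have : (s + (0:Nat)) % 5 = 0 := by omega
                                          rw [this]; rfl)
        have e1 := hg 1 x1 (by omega) (by have : (s + (1:Nat)) % 5 = 1 := by omega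
                                          rw [this]; rfl)
        have e2 := hg 2 x2 (by omega) (by have : (s + (2:Nat)) % 5 = 2 := by omega
                                          rw [this]; rfl)
        have e3 := hg 3 x3 (by omega) (by have : (s + (3:Nat)) % 5 = 3 := by omega
                                          rw [this]; rfl)
        have e4 := hg 4 x4 (by omega) (by have : (s + (4:Nat)) % 5 = 4 := by omega
                                          rw [this]; rfl)
        norm_num at e0 e1 e2 e3 e4 ⊢
        rw [e0, e1, e2, e3, e4]
        exact ⟨rfl, rfl, rfl, rfl, rfl⟩
    rw [show (([x0, x1, x2, x3, x4] : List String).length : Int) = 5 from by norm_num, hblock]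
    by_cases h5 : s + 5 ≤ count
    · rw [hrec]
      obtain ⟨k, hk1, hk2⟩ : ∃ k : Nat, count - s = (k : Int) ∧ 5 ≤ k :=
        ⟨(count - s).toNat, by omega, by omega⟩
      rw [hk1]
      have hsl : PySem.List.slice (List.map (pvG [x0, x1, x2, x3, x4]) (PySem.List.pyRange s (s + 5) 1)) none (some ((k : Nat) : Int))
          = List.map (pvG [x0, x1, x2, x3, x4]) (PySem.List.pyRange s (s + 5) 1) := by
        rw [PySem.List.slice_to_natCast]
        exact List.take_of_length_le (by simp [PySem.List.length_pyRange_one]; omega)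
      simp only [hsl]
      rw [PySem.List.pyRange_one_append s (s + 5) count (by omega) h5, List.map_append]
    · rw [hrec, PySem.List.pyRange_one_eq_nil (a := s + 5) (b := count) (by omega), List.map_nil]
      obtain ⟨k, hk1, hk2, hk3⟩ : ∃ k : Nat, count - s = (k : Int) ∧ 1 ≤ k ∧ k ≤ 4 :=
        ⟨(count - s).toNat, by omega, by omega, by omega⟩
      rw [hk1]
      have hsl : PySem.List.slice (List.map (pvG [x0, x1, x2, x3, x4]) (PySem.List.pyRange s (s + 5) 1)) none (some ((k : Nat) : Int))
          = List.map (pvG [x0, x1, x2, x3, x4]) (PySem.List.pyRange s count 1) := by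
        rw [PySem.List.slice_to_natCast, ← List.map_take]
        congr 1
        rw [PySem.List.pyRange_one, PySem.List.pyRange_one, ← List.map_take, List.take_range]
        have h5' : (s + 5 - s).toNat = 5 := by omega
        have hc : (count - s).toNat = k := by omega
        rw [h5', hc, Nat.min_eq_left (by omega)]
      simp only [hsl, List.append_nil]
  · rw [pvBlocks, dif_neg (fun h => hlt h.1),
        PySem.List.pyRange_one_eq_nil (by omega), List.map_nil]
termination_by (count - s).toNat
decreasing_by omega

-- A's single branching loop equals B's cycle loop, for any 5-element base list.
lemma pv_main (b : List String) (hb : b.length = 5) (count : Int) :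
    (PySem.List.pyRange 0 count 1).foldl
      (fun acc i =>
        let text := PySem.List.pyGetD b (PySem.Int.mod i (b.length : Int)) ""
        let text := if (b.length : Int) ≤ i then "Variación " ++ PySem.Int.toStr i ++ ": " ++ text else text
        acc ++ [text]) []
    = pvBlocks b count 0 := by
  rcases b with _ | ⟨x0, _ | ⟨x1, _ | ⟨x2, _ | ⟨x3, _ | ⟨x4, _ | ⟨x5, t⟩⟩⟩⟩⟩⟩ <;> simp at hb
  refine Eq.trans (PySem.List.foldl_append_singleton_eq_map
      (f := pvG [x0, x1, x2, x3, x4]) (l := PySem.List.pyRange 0 count 1) (acc := [])) ?_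
  rw [List.nil_append]
  exact (pv_blocks_eq_map x0 x1 x2 x3 x4 count 0 (by omega) (by omega)).symm

-- ===== VERDICT (by name: the statement is the Claim_ definition above) =====
theorem generate_training_texts_spec : Claim_equal_generate_training_texts := by
  intro language count _
  unfold Spec_generate_training_texts generate_training_texts generate_training_texts_alt
  have hb : (((PySem.Dict.ofList [("es", pvTextsEs), ("en", pvTextsEn)] : PySem.Dict String (List String)).get? language).getD pvTextsEs).length = 5 := by
    rw [pv_get_dict]; split_ifs <;> decide
  exact pv_main _ hb count
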